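-- pv_equiv track=rewrite | github.com/navmou/lunar_lander | logic.py | diagonal_plus_1_turn
-- ===== SOURCE A (Python) =====
-- def diagonal_plus_1_turn(board , player , x , y , turning_list , counter):
--     if x > 0 and y < 7:
--         if board[x-1][y+1] == -player:
--             counter+=1
--             turning_list.append((x-1,y+1))
--             return diagonal_plus_1_turn(board,player,x-1,y+1,turning_list, counter )
--         elif board[x-1][y+1] == player:
--             return turning_list
--         else:
--             for i in range(counter):
--                 turning_list.pop(-1)
--             return turning_list
--     else:
--         return turning_list
-- ===== SOURCE B (Python) =====
-- def diagonal_plus_1_turn(board, player, x, y, turning_list, counter):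
--     # Non-mutating re-implementation: scan the up-right diagonal once, collecting the
--     # run of opponent pieces, then decide once what to return (A mutates turning_list
--     # in place; the equivalence is about the RETURN value only).
--     run = []
--     while x > 0 and y < 7 and board[x-1][y+1] == -player:
--         run.append((x-1, y+1))
--         x, y = x-1, y+1
--     if x > 0 and y < 7 and board[x-1][y+1] != player:
--         # run ends on a blank cell: the whole run is discarded and `counter`
--         # entries come off the end of the original list
--         return turning_list[:len(turning_list)-counter]
--     return turning_list + run
-- ===== Notes on version B (the rewrite author's own statement) =====
-- stated objective: simpler
-- what changed: Replaces the mutating tail recursion (append-as-you-go plus a pop loop to undo) with a single non-mutating scan that collects the run of opponent pieces and then decides once whether to keep the run, return the list unchanged, or truncate it with one slice; Pre_ excludes inputs where A raises IndexError (missing diagonal cell, or blank ending with counter > len(turning_list)) and blank-ending inputs with counter < 0, an accidental corner no natural caller reaches, where A's range(counter) pop-undo and B's clamped slice read the bad count differently.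
import Mathlib
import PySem

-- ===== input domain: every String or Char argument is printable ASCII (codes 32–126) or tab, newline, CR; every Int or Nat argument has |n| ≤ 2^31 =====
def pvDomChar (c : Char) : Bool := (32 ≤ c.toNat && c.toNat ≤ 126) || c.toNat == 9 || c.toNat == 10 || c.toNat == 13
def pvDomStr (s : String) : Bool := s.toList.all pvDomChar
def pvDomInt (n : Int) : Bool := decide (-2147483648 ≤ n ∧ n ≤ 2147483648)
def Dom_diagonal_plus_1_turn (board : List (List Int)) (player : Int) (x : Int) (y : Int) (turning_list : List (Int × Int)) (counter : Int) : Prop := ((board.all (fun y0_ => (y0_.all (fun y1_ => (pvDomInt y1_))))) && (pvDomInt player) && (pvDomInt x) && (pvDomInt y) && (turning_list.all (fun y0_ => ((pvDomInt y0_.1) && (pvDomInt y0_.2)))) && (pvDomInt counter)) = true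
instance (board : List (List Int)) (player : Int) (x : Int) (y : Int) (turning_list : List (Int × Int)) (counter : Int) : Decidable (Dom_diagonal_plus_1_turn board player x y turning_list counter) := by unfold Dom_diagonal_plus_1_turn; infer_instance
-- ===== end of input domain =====

-- B is a non-mutating single-scan rewrite: it collects the run of opponent pieces along
-- the up-right diagonal, then decides ONCE whether to keep the run, return the list, or
-- truncate it with one slice (objective: simpler; A mutates turning_list in place, so
-- the equivalence proved here is about the RETURN value only).


-- ===== PORT A =====
-- board[i][j] as both Pythons literally write it (Python-exact incl. negative indices;
-- none = IndexError)
def cellAt (board : List (List Int)) (i j : Int) : Option Int :=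
  (PySem.List.pyGet? board i).bind (fun row => PySem.List.pyGet? row j)

-- `for i in range(counter): turning_list.pop(-1)` — exact while every pop hits a
-- nonempty list (guaranteed under Pre_); Python raises IndexError on an empty pop.
def popN : Nat → List (Int × Int) → List (Int × Int)
  | 0, l => l
  | n + 1, l => popN n l.dropLast

def diagonal_plus_1_turn (board : List (List Int)) (player : Int) (x : Int) (y : Int) (turning_list : List (Int × Int)) (counter : Int) : List (Int × Int) :=
  if h : 0 < x ∧ y < 7 then
    match cellAt board (x - 1) (y + 1) with
    | some v =>
      if v = -player then
        diagonal_plus_1_turn board player (x - 1) (y + 1) (turning_list ++ [(x - 1, y + 1)]) (counter + 1)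
      else if v = player then turning_list
      else popN counter.toNat turning_list
    | none => turning_list  -- Python raises IndexError here (totality default)
  else turning_list
termination_by x.toNat
decreasing_by omega

-- ===== PORT B =====
-- the `while` loop of B: returns the final (x, y) and the collected run
def scanRun (board : List (List Int)) (player : Int) (x : Int) (y : Int) (run : List (Int × Int)) : Int × Int × List (Int × Int) :=
  if h : 0 < x ∧ y < 7 ∧ cellAt board (x - 1) (y + 1) = some (-player) then
    scanRun board player (x - 1) (y + 1) (run ++ [(x - 1, y + 1)])
  else (x, y, run)
termination_by x.toNat
decreasing_by omega

def diagonal_plus_1_turn_alt (board : List (List Int)) (player : Int) (x : Int) (y : Int) (turning_list : List (Int × Int)) (counter : Int) : List (Int × Int) :=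
  let s := scanRun board player x y []
  if 0 < s.1 ∧ s.2.1 < 7 then
    match cellAt board (s.1 - 1) (s.2.1 + 1) with
    | some w =>
      if w ≠ player then PySem.List.slice turning_list none (some ((turning_list.length : Int) - counter))
      else turning_list ++ s.2.2
    | none => turning_list ++ s.2.2  -- Python raises IndexError here (totality default)
  else turning_list ++ s.2.2

-- ===== PRECONDITION & SPEC =====
-- Pre_ says: every cell the scan visits along the up-right diagonal exists (else A
-- raises IndexError), and if the scan ends on a blank cell then 0 <= counter <=
-- len(turning_list) (counter > len makes A's pop loop raise IndexError; counter < 0 is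
-- a corner no natural caller reaches — counter counts appended pieces — where A's
-- range(counter) pop-undo and B's clamped slice read the bad count differently).
def Pre_diagonal_plus_1_turn (board : List (List Int)) (player : Int) (x : Int) (y : Int) (turning_list : List (Int × Int)) (counter : Int) : Prop :=
  ∀ k : Nat, k ≤ min x.toNat board.length →
    ((∀ j : Nat, j < k → cellAt board (x - 1 - (j : Int)) (y + 1 + (j : Int)) = some (-player)) ∧
      0 < x - (k : Int) ∧ y + (k : Int) < 7) →
    ((cellAt board (x - 1 - (k : Int)) (y + 1 + (k : Int))).isSome = true ∧
      (cellAt board (x - 1 - (k : Int)) (y + 1 + (k : Int)) ≠ some player →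
        cellAt board (x - 1 - (k : Int)) (y + 1 + (k : Int)) ≠ some (-player) →
        0 ≤ counter ∧ counter ≤ turning_list.length))
instance (board : List (List Int)) (player : Int) (x : Int) (y : Int) (turning_list : List (Int × Int)) (counter : Int) : Decidable (Pre_diagonal_plus_1_turn board player x y turning_list counter) := by unfold Pre_diagonal_plus_1_turn; exact Nat.decidableBallLE _ _

def pvWitness_diagonal_plus_1_turn : List (List Int) × Int × Int × Int × (List (Int × Int)) × Int :=
  ([[0,0,0,0,0,0,0,0],[0,0,0,0,0,0,0,0],[0,0,0,0,0,0,0,0],[0,0,0,0,0,0,0,0],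
    [0,0,0,0,-1,1,0,0],[0,0,0,-1,0,0,0,0],[0,0,0,0,0,0,0,0],[0,0,0,0,0,0,0,0]],
   1, 6, 2, [], 0)

def Spec_diagonal_plus_1_turn (board : List (List Int)) (player : Int) (x : Int) (y : Int) (turning_list : List (Int × Int)) (counter : Int) (out : List (Int × Int)) : Prop := out = diagonal_plus_1_turn_alt board player x y turning_list counter
instance (board : List (List Int)) (player : Int) (x : Int) (y : Int) (turning_list : List (Int × Int)) (counter : Int) (out : List (Int × Int)) : Decidable (Spec_diagonal_plus_1_turn board player x y turning_list counter out) := by unfold Spec_diagonal_plus_1_turn; infer_instance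

-- ===== CLAIM (what is proved, stated in full; the proofs are below) =====
def Claim_equal_diagonal_plus_1_turn : Prop := ∀ (board : List (List Int)) (player : Int) (x : Int) (y : Int) (turning_list : List (Int × Int)) (counter : Int), Dom_diagonal_plus_1_turn board player x y turning_list counter → Pre_diagonal_plus_1_turn board player x y turning_list counter → Spec_diagonal_plus_1_turn board player x y turning_list counter (diagonal_plus_1_turn board player x y turning_list counter)

-- ===== LEMMAS AND PROOFS =====

lemma popN_eq_take (n : Nat) (l : List (Int × Int)) (h : n ≤ l.length) :
    popN n l = l.take (l.length - n) := by
  induction n generalizing l with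
  | zero => simp [popN]
  | succ m ih =>
    rw [popN, ih _ (by simp; omega), List.length_dropLast, List.dropLast_eq_take,
      List.take_take]
    congr 1
    omega

lemma scanRun_stop (board : List (List Int)) (player : Int) (x y : Int) (acc : List (Int × Int))
    (h : ¬ (0 < x ∧ y < 7 ∧ cellAt board (x - 1) (y + 1) = some (-player))) :
    scanRun board player x y acc = (x, y, acc) := by
  rw [scanRun]; simp [h]

lemma scanRun_step (board : List (List Int)) (player : Int) (x y : Int) (acc : List (Int × Int))
    (h : 0 < x ∧ y < 7 ∧ cellAt board (x - 1) (y + 1) = some (-player)) :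
    scanRun board player x y acc = scanRun board player (x - 1) (y + 1) (acc ++ [(x - 1, y + 1)]) := by
  rw [scanRun]; simp [h]

lemma scanRun_acc (board : List (List Int)) (player : Int) :
    ∀ (n : Nat) (x y : Int) (acc : List (Int × Int)), x.toNat ≤ n →
      scanRun board player x y acc =
        ((scanRun board player x y []).1, (scanRun board player x y []).2.1,
          acc ++ (scanRun board player x y []).2.2) := by
  intro n
  induction n with
  | zero =>
    intro x y acc hx
    have hng : ¬ (0 < x ∧ y < 7 ∧ cellAt board (x - 1) (y + 1) = some (-player)) := by
      intro h1; omega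
    rw [scanRun_stop _ _ _ _ _ hng, scanRun_stop _ _ _ _ _ hng]
    simp
  | succ m ih =>
    intro x y acc hx
    by_cases h : 0 < x ∧ y < 7 ∧ cellAt board (x - 1) (y + 1) = some (-player)
    · rw [scanRun_step _ _ _ _ acc h, scanRun_step _ _ _ _ [] h,
        ih (x - 1) (y + 1) (acc ++ [(x - 1, y + 1)]) (by omega),
        ih (x - 1) (y + 1) ([] ++ [(x - 1, y + 1)]) (by omega)]
      simp
    · rw [scanRun_stop _ _ _ _ _ h, scanRun_stop _ _ _ _ _ h]
      simp

lemma scanRun_spec (board : List (List Int)) (player : Int) :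
    ∀ (n : Nat) (x y : Int), x.toNat ≤ n →
      ((scanRun board player x y []).1 = x - ((scanRun board player x y []).2.2.length : Int)) ∧
      ((scanRun board player x y []).2.1 = y + ((scanRun board player x y []).2.2.length : Int)) ∧
      (∀ j : Nat, j < (scanRun board player x y []).2.2.length →
        cellAt board (x - 1 - (j : Int)) (y + 1 + (j : Int)) = some (-player)) ∧
      ¬ (0 < (scanRun board player x y []).1 ∧ (scanRun board player x y []).2.1 < 7 ∧
        cellAt board ((scanRun board player x y []).1 - 1) ((scanRun board player x y []).2.1 + 1) = some (-player)) := by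
  intro n
  induction n with
  | zero =>
    intro x y hx
    have hng : ¬ (0 < x ∧ y < 7 ∧ cellAt board (x - 1) (y + 1) = some (-player)) := by
      intro h1; omega
    rw [scanRun_stop _ _ _ _ _ hng]
    exact ⟨by simp, by simp, by simp, by simpa using hng⟩
  | succ m ih =>
    intro x y hx
    by_cases h : 0 < x ∧ y < 7 ∧ cellAt board (x - 1) (y + 1) = some (-player)
    · rw [scanRun_step _ _ _ _ [] h,
        scanRun_acc board player (x - 1).toNat (x - 1) (y + 1) ([] ++ [(x - 1, y + 1)]) le_rfl]
      obtain ⟨i1, i2, i3, i4⟩ := ih (x - 1) (y + 1) (by omega)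
      refine ⟨by simp; omega, by simp; omega, ?_, by simpa using i4⟩
      intro j hj
      match j with
      | 0 => simpa using h.2.2
      | (j' + 1) =>
        have e1 : x - 1 - ((j' + 1 : Nat) : Int) = (x - 1) - 1 - (j' : Int) := by push_cast; ring
        have e2 : y + 1 + ((j' + 1 : Nat) : Int) = (y + 1) + 1 + (j' : Int) := by push_cast; ring
        rw [e1, e2]
        refine i3 j' ?_
        simp at hj
        omega
    · rw [scanRun_stop _ _ _ _ _ h]
      exact ⟨by simp, by simp, by simp, by simpa using h⟩

lemma cellAt_row_lt (board : List (List Int)) (i j v : Int)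
    (h : cellAt board i j = some v) (hi : 0 ≤ i) : i < (board.length : Int) := by
  unfold cellAt at h
  cases hrow : PySem.List.pyGet? board i with
  | none => rw [hrow] at h; simp at h
  | some row =>
    have hin : PySem.Raise.InRange board.length i := by
      by_contra hno
      rw [← PySem.List.pyGet?_eq_none_iff board i] at hno
      rw [hrow] at hno
      simp at hno
    simp [PySem.Raise.InRange] at hin
    omega

lemma pre_shift (board : List (List Int)) (player : Int) (x y : Int)
    (tl : List (Int × Int)) (counter : Int)
    (hv : cellAt board (x - 1) (y + 1) = some (-player))
    (hpre : Pre_diagonal_plus_1_turn board player x y tl counter) :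
    Pre_diagonal_plus_1_turn board player (x - 1) (y + 1) (tl ++ [(x - 1, y + 1)]) (counter + 1) := by
  intro k hk hcond
  obtain ⟨hpref, hg1, hg2⟩ := hcond
  have hxL : x - 1 < (board.length : Int) := cellAt_row_lt board (x - 1) (y + 1) _ hv (by omega)
  have e1 : (x - 1) - 1 - (k : Int) = x - 1 - ((k + 1 : Nat) : Int) := by push_cast; ring
  have e2 : (y + 1) + 1 + (k : Int) = y + 1 + ((k + 1 : Nat) : Int) := by push_cast; ring
  have hb := hpre (k + 1) (by omega) ⟨?_, by push_cast; omega, by push_cast; omega⟩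
  · rw [e1, e2]
    refine ⟨hb.1, fun h1 h2 => ?_⟩
    have := hb.2 h1 h2
    constructor
    · omega
    · simp
      omega
  · intro j hj
    match j with
    | 0 => simpa using hv
    | (j' + 1) =>
      have e3 : x - 1 - ((j' + 1 : Nat) : Int) = (x - 1) - 1 - (j' : Int) := by push_cast; ring
      have e4 : y + 1 + ((j' + 1 : Nat) : Int) = (y + 1) + 1 + (j' : Int) := by push_cast; ring
      rw [e3, e4]
      exact hpref j' (by omega)

lemma main_equiv (board : List (List Int)) (player : Int) :
    ∀ (n : Nat) (x y : Int) (tl : List (Int × Int)) (counter : Int), x.toNat ≤ n →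
      Pre_diagonal_plus_1_turn board player x y tl counter →
      diagonal_plus_1_turn board player x y tl counter =
        diagonal_plus_1_turn_alt board player x y tl counter := by
  intro n
  induction n with
  | zero =>
    intro x y tl counter hx _
    have hng : ¬ (0 < x ∧ y < 7) := by intro h1; omega
    have hstop : ¬ (0 < x ∧ y < 7 ∧ cellAt board (x - 1) (y + 1) = some (-player)) := by
      intro h1; exact hng ⟨h1.1, h1.2.1⟩
    rw [diagonal_plus_1_turn, dif_neg hng]
    simp only [diagonal_plus_1_turn_alt, scanRun_stop _ _ _ _ _ hstop]
    rw [if_neg hng]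
    simp
  | succ m ih =>
    intro x y tl counter hx hpre
    by_cases hg : 0 < x ∧ y < 7
    · have h0 := hpre 0 (by omega) ⟨by intro j hj; omega, by simpa using hg.1, by simpa using hg.2⟩
      rw [show x - 1 - ((0 : Nat) : Int) = x - 1 by simp, show y + 1 + ((0 : Nat) : Int) = y + 1 by simp] at h0
      rw [diagonal_plus_1_turn, dif_pos hg]
      cases hv : cellAt board (x - 1) (y + 1) with
      | none =>
        rw [hv] at h0
        simp at h0
      | some v =>
        show (if v = -player then
            diagonal_plus_1_turn board player (x - 1) (y + 1) (tl ++ [(x - 1, y + 1)]) (counter + 1)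
          else if v = player then tl else popN counter.toNat tl) =
          diagonal_plus_1_turn_alt board player x y tl counter
        by_cases hvm : v = -player
        · -- opponent piece: A recurses; B's scan takes one step
          rw [if_pos hvm]
          rw [ih (x - 1) (y + 1) (tl ++ [(x - 1, y + 1)]) (counter + 1) (by omega)
              (pre_shift board player x y tl counter (hvm ▸ hv) hpre)]
          have hcond : 0 < x ∧ y < 7 ∧ cellAt board (x - 1) (y + 1) = some (-player) :=
            ⟨hg.1, hg.2, hvm ▸ hv⟩
          simp only [diagonal_plus_1_turn_alt, scanRun_step _ _ _ _ [] hcond,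
            scanRun_acc board player (x - 1).toNat (x - 1) (y + 1) ([] ++ [(x - 1, y + 1)]) le_rfl]
          obtain ⟨ht1, ht2, hpref, hend⟩ := scanRun_spec board player (x - 1).toNat (x - 1) (y + 1) le_rfl
          by_cases hf : 0 < (scanRun board player (x - 1) (y + 1) []).1 ∧
              (scanRun board player (x - 1) (y + 1) []).2.1 < 7
          · rw [if_pos hf, if_pos hf]
            cases hw : cellAt board ((scanRun board player (x - 1) (y + 1) []).1 - 1)
                ((scanRun board player (x - 1) (y + 1) []).2.1 + 1) with
            | none => simp
            | some w =>
              by_cases hwp : w = player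
              · simp [hwp]
              · -- blank terminator: both truncate; counter bounds come from Pre_
                have hwm : w ≠ -player := fun he => hend ⟨hf.1, hf.2, by rw [hw, he]⟩
                have hxL : x - 1 < (board.length : Int) :=
                  cellAt_row_lt board (x - 1) (y + 1) v hv (by omega)
                have hb := hpre ((scanRun board player (x - 1) (y + 1) []).2.2.length + 1)
                  (by omega)
                  ⟨?_, by push_cast; omega, by push_cast; omega⟩
                · rw [show x - 1 - (((scanRun board player (x - 1) (y + 1) []).2.2.length + 1 : Nat) : Int) =
                      (scanRun board player (x - 1) (y + 1) []).1 - 1 by push_cast; omega,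
                    show y + 1 + (((scanRun board player (x - 1) (y + 1) []).2.2.length + 1 : Nat) : Int) =
                      (scanRun board player (x - 1) (y + 1) []).2.1 + 1 by push_cast; omega,
                    hw] at hb
                  obtain ⟨hc0, hcl⟩ := hb.2 (by simpa using hwp) (by simpa using hwm)
                  have hk : ((tl.length : Int) - counter) = ((tl.length - counter.toNat : Nat) : Int) := by
                    omega
                  have hk2 : (((tl ++ [(x - 1, y + 1)]).length : Int) - (counter + 1)) =
                      ((tl.length - counter.toNat : Nat) : Int) := by simp; omega
                  rw [hk, hk2, PySem.List.slice_to_natCast, PySem.List.slice_to_natCast,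
                    List.take_append_of_le_length (by omega)]
                  simp
                · intro j hj
                  match j with
                  | 0 => simpa using (hvm ▸ hv)
                  | (j' + 1) =>
                    have e1 : x - 1 - ((j' + 1 : Nat) : Int) = (x - 1) - 1 - (j' : Int) := by
                      push_cast; ring
                    have e2 : y + 1 + ((j' + 1 : Nat) : Int) = (y + 1) + 1 + (j' : Int) := by
                      push_cast; ring
                    rw [e1, e2]
                    exact hpref j' (by omega)
          · rw [if_neg hf, if_neg hf]
            simp
        · rw [if_neg hvm]
          have hstop : ¬ (0 < x ∧ y < 7 ∧ cellAt board (x - 1) (y + 1) = some (-player)) := by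
            rintro ⟨-, -, h2⟩; rw [hv] at h2; exact hvm (Option.some.inj h2)
          simp only [diagonal_plus_1_turn_alt, scanRun_stop _ _ _ _ _ hstop]
          rw [if_pos hg, hv]
          by_cases hvp : v = player
          · -- own piece terminates the run: both return turning_list
            simp [hvp]
          · -- blank cell: A pops `counter` items, B slices them off
            rw [hv] at h0
            obtain ⟨hc0, hcl⟩ := h0.2 (by simpa using hvp) (by simpa using hvm)
            have hk : ((tl.length : Int) - counter) = ((tl.length - counter.toNat : Nat) : Int) := by
              omega
            rw [hk, PySem.List.slice_to_natCast, popN_eq_take counter.toNat tl (by omega)]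
            simp [hvp]
    · have hstop : ¬ (0 < x ∧ y < 7 ∧ cellAt board (x - 1) (y + 1) = some (-player)) := by
        intro h1; exact hg ⟨h1.1, h1.2.1⟩
      rw [diagonal_plus_1_turn, dif_neg hg]
      simp only [diagonal_plus_1_turn_alt, scanRun_stop _ _ _ _ _ hstop]
      rw [if_neg hg]
      simp

-- ===== VERDICT (by name: the statement is the Claim_ definition above) =====
theorem diagonal_plus_1_turn_spec : Claim_equal_diagonal_plus_1_turn := by
  intro board player x y tl counter _ hpre
  exact main_equiv board player x.toNat x y tl counter le_rfl hpre
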